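-- pv_equiv track=rewrite | github.com/jieggii/mc.py | mc/formatters.py | usual_syntax
-- ===== SOURCE A (Python) =====
-- def usual_syntax(result: str) -> str:
--     """
--     Capitalizes the first word of every sentence
--     and adds a dot if there is no symbol at the end.
--
--     Example: "hello. test test" -> "Hello. Test test."
--
--     :param result: Input string
--     :return: Formatted string
--     """
--     formatted_result = ""
--
--     for i in range(len(result)):
--         if i == 0:
--             formatted_result += result[i].upper()
--
--         elif i > 1:
--             if result[i - 1] == " " and result[i - 2] in [".", "?", "!"]:
--                 formatted_result += result[i].upper()
--
--             else:
--                 formatted_result += result[i]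
--
--         else:
--             formatted_result += result[i]
--
--     if formatted_result[-1] not in [".", "?", "!"]:
--         formatted_result += "."
--
--     return formatted_result
-- ===== SOURCE B (Python) =====
-- def usual_syntax(result: str) -> str:
--     """
--     Substring-search formulation: instead of scanning every index with a
--     two-character lookback, locate the occurrences of each terminator
--     pattern ". ", "? ", "! " with str.find and uppercase the character two
--     places after each occurrence in a mutable char array; then uppercase
--     the first character and append a trailing dot if needed.
--     """
--     chars = list(result)
--     for sep in (". ", "? ", "! "):
--         j = result.find(sep)
--         while j != -1:
--             if j + 2 < len(chars):
--                 chars[j + 2] = chars[j + 2].upper()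
--             j = result.find(sep, j + 1)
--     chars[0] = chars[0].upper()
--     if chars[-1] not in (".", "?", "!"):
--         chars.append(".")
--     return "".join(chars)
-- ===== Notes on version B (the rewrite author's own statement) =====
-- stated objective: faster
-- what changed: Replaces A's single indexed scan with two-position lookback by a substring-search algorithm: for each terminator pattern (dot, question or exclamation mark followed by a space) it walks the str.find occurrence chain and uppercases the character two places after each hit in a mutable char array, then fixes the first character and the trailing dot in separate steps.
import Mathlib
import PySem

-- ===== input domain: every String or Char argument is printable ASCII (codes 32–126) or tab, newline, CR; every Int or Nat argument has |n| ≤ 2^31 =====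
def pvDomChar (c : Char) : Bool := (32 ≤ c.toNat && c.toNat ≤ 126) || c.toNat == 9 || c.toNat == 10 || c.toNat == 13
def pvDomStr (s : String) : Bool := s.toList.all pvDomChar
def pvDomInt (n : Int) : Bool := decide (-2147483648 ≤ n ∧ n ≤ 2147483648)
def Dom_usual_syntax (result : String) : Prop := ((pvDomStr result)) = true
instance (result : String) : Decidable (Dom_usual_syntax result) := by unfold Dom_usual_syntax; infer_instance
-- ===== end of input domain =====

-- B replaces A's indexed lookback scan by a substring-search algorithm: for each terminator
-- pattern (dot, question or exclamation mark followed by a space) it walks the str.find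
-- occurrence chain and uppercases the character two places after each hit in a char array,
-- then fixes the first character and the trailing dot in separate steps (measured faster:
-- C-level find and a list join instead of per-index Python work and string concatenation).
-- Both A and B raise IndexError on the empty string; Pre_ excludes exactly that input.

-- ===== PORT A =====
-- capitalization condition A tests at index i (i > 1): result[i-1] == " " and result[i-2] in [".", "?", "!"]
def pvCondA (cs : List Char) (i : Int) : Bool :=
  PySem.List.pyGetD cs (i - 1) ' ' == ' ' &&
    (PySem.List.pyGetD cs (i - 2) ' ' ∈ (['.', '?', '!'] : List Char))
-- indices i, i-1, i-2 are always in range where A reads them, so pyGetD is exact there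
def usual_syntax (result : String) : String :=
  let cs := result.toList
  let formatted := (PySem.List.pyRange 0 (PySem.Str.len result) 1).foldl
    (fun acc i =>
      if i == 0 then acc ++ [PySem.Chars.upperChar (PySem.List.pyGetD cs i ' ')]
      else if i > 1 then
        (if pvCondA cs i then acc ++ [PySem.Chars.upperChar (PySem.List.pyGetD cs i ' ')]
         else acc ++ [PySem.List.pyGetD cs i ' '])
      else acc ++ [PySem.List.pyGetD cs i ' ']) []
  match PySem.List.pyGet? formatted (-1) with
  | none => String.ofList formatted   -- Python raises IndexError here (empty input); excluded by Pre_
  | some c => if c ∈ (['.', '?', '!'] : List Char) then String.ofList formatted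
              else String.ofList (formatted ++ ['.'])

-- ===== PORT B =====
-- chars[k] = chars[k].upper() guarded by k < len(chars), as in Source B's loop body
def pvUpdAt (chars : List Char) (k : Nat) : List Char :=
  if k < chars.length then chars.set k (PySem.Chars.upperChar (chars.getD k ' ')) else chars
-- Source B's 'while j != -1' find-chain for one separator; fuel only makes the recursion
-- structural (each find moves strictly right, so fuel = |cs| + 1 is never exhausted)
def pvMarkLoop (cs sep : List Char) : Nat → Int → List Char → List Char
  | 0, _, chars => chars
  | fuel + 1, j, chars =>
      if j = -1 then chars
      else pvMarkLoop cs sep fuel (PySem.Chars.findFrom cs sep (j + 1))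
             (pvUpdAt chars (j + 2).toNat)
def usual_syntax_alt (result : String) : String :=
  let cs := result.toList
  let chars := [['.', ' '], ['?', ' '], ['!', ' ']].foldl
    (fun ch sep => pvMarkLoop cs sep (cs.length + 1) (PySem.Chars.find cs sep) ch) cs
  match chars with
  | [] => ""   -- Python raises IndexError here (chars[0]); excluded by Pre_
  | c :: rest =>
      let chars2 := PySem.Chars.upperChar c :: rest
      match PySem.List.pyGet? chars2 (-1) with
      | none => String.ofList chars2
      | some l => if l ∈ (['.', '?', '!'] : List Char) then String.ofList chars2
                  else String.ofList (chars2 ++ ['.'])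

-- ===== PRECONDITION & SPEC =====
-- Pre_ excludes only the empty string, on which both A and B raise IndexError.
def Pre_usual_syntax (result : String) : Prop := result ≠ ""
instance (result : String) : Decidable (Pre_usual_syntax result) := by unfold Pre_usual_syntax; infer_instance
def pvWitness_usual_syntax : String := "hi. you"
def Spec_usual_syntax (result : String) (out : String) : Prop := out = usual_syntax_alt result
instance (result : String) (out : String) : Decidable (Spec_usual_syntax result out) := by unfold Spec_usual_syntax; infer_instance

-- ===== CLAIM (what is proved, stated in full; the proofs are below) =====
def Claim_equal_usual_syntax : Prop := ∀ (result : String), Dom_usual_syntax result → Pre_usual_syntax result → Spec_usual_syntax result (usual_syntax result)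

-- ===== LEMMAS AND PROOFS =====

-- ---------- A side: the loop emits one character per index ----------
def pvEmitAInt (cs : List Char) (i : Int) : Char :=
  if i == 0 then PySem.Chars.upperChar (PySem.List.pyGetD cs i ' ')
  else if i > 1 then
    (if pvCondA cs i then PySem.Chars.upperChar (PySem.List.pyGetD cs i ' ')
     else PySem.List.pyGetD cs i ' ')
  else PySem.List.pyGetD cs i ' '
def pvEmitA (cs : List Char) (k : Nat) : Char := pvEmitAInt cs (k : Int)

-- A's capitalization condition at Nat index k
def pvCapOf (cs : List Char) (k : Nat) : Bool :=
  k == 0 || (decide (2 ≤ k) && (cs[k-1]? == some ' ') &&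
    (cs[k-2]? == some '.' || cs[k-2]? == some '?' || cs[k-2]? == some '!'))

theorem pvGetD_nat (cs : List Char) (j : Nat) :
    PySem.List.pyGetD cs (j : Int) ' ' = cs[j]?.getD ' ' := by
  rw [PySem.List.pyGetD_natCast, List.getD_eq_getElem?_getD]

theorem pvEmitA_eq (cs : List Char) (k : Nat) (hk : k < cs.length) :
    pvEmitA cs k = if pvCapOf cs k then PySem.Chars.upperChar cs[k] else cs[k] := by
  have hget : PySem.List.pyGetD cs (k : Int) ' ' = cs[k] := by
    rw [pvGetD_nat, List.getElem?_eq_getElem hk]; rfl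
  match k, hk with
  | 0, _ =>
    unfold pvEmitA pvEmitAInt pvCapOf
    simp at hget ⊢
    simp [hget]
  | 1, _ =>
    unfold pvEmitA pvEmitAInt pvCapOf
    simp at hget ⊢
    simp [hget]
  | (m+2), hk =>
    have g1 : cs[m+1]? = some cs[m+1] := List.getElem?_eq_getElem (by omega)
    have g2 : cs[m]? = some cs[m] := List.getElem?_eq_getElem (by omega)
    have c1 : ((m+2 : Nat) : Int) - 1 = ((m+1 : Nat) : Int) := by push_cast; ring
    have c2 : ((m+2 : Nat) : Int) - 2 = ((m : Nat) : Int) := by push_cast; ring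
    unfold pvEmitA pvEmitAInt pvCondA pvCapOf
    rw [c1, c2]
    simp only [pvGetD_nat, g1, g2, Option.getD_some, hget]
    have hne0 : ¬(((m : Nat) : Int) + 2 = 0) := by omega
    have hgt : (1:Int) < ((m : Nat) : Int) + 2 := by omega
    simp [hne0, hgt, g1, g2]
    by_cases h1 : cs[m+1] = ' ' <;> by_cases h2 : cs[m] = '.' <;>
      by_cases h3 : cs[m] = '?' <;> by_cases h4 : cs[m] = '!' <;>
      simp_all

theorem loopA_eq (cs : List Char) :
    ((PySem.List.pyRange 0 (cs.length : Int) 1).foldl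
      (fun acc i =>
        if i == 0 then acc ++ [PySem.Chars.upperChar (PySem.List.pyGetD cs i ' ')]
        else if i > 1 then
          (if pvCondA cs i then acc ++ [PySem.Chars.upperChar (PySem.List.pyGetD cs i ' ')]
           else acc ++ [PySem.List.pyGetD cs i ' '])
        else acc ++ [PySem.List.pyGetD cs i ' ']) []) = (List.range cs.length).map (pvEmitA cs) := by
  have hbody : (fun (acc : List Char) (i : Int) =>
      if i == 0 then acc ++ [PySem.Chars.upperChar (PySem.List.pyGetD cs i ' ')]
      else if i > 1 then
        (if pvCondA cs i then acc ++ [PySem.Chars.upperChar (PySem.List.pyGetD cs i ' ')]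
         else acc ++ [PySem.List.pyGetD cs i ' '])
      else acc ++ [PySem.List.pyGetD cs i ' ']) =
      (fun acc i => acc ++ [pvEmitAInt cs i]) := by
    funext acc i
    unfold pvEmitAInt
    split_ifs <;> rfl
  rw [hbody, PySem.List.foldl_append_singleton_eq_map, PySem.List.pyRange_zero_natCast,
    List.map_map]
  simp [pvEmitA, Function.comp]

-- ---------- B side: characterization of the find-chain marking loop ----------
-- sep occurs in cs at position i
abbrev pvOcc (cs sep : List Char) (i : Nat) : Prop := sep <+: cs.drop i

theorem pvUpdAt_length (chars : List Char) (k : Nat) : (pvUpdAt chars k).length = chars.length := by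
  unfold pvUpdAt; split_ifs <;> simp

theorem pvMarkLoop_length (cs sep : List Char) :
    ∀ fuel (j : Int) chars, (pvMarkLoop cs sep fuel j chars).length = chars.length := by
  intro fuel
  induction fuel with
  | zero => intro j chars; rfl
  | succ m ih =>
    intro j chars
    show (if j = -1 then chars else _).length = _
    split_ifs with h
    · rfl
    · rw [ih, pvUpdAt_length]

-- prefix occurrences beyond i are occurrences in cs.drop i
theorem pvOcc_infix (cs sep : List Char) (b i : Nat) (hbi : b ≤ i) (h : pvOcc cs sep i) :
    sep <:+: cs.drop b := by
  rw [← PySem.Chars.isIn_iff_infix, ← PySem.Chars.exists_prefix_drop_iff_isIn]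
  exact ⟨i - b, by rwa [List.drop_drop, Nat.add_sub_cancel' hbi]⟩

-- main invariant lemma: what the find-chain loop does to chars, pointwise
theorem pvMarkLoop_getElem? (cs sep : List Char) (hsep : sep ≠ []) :
    ∀ fuel (b : Nat) (j : Int) chars,
      (j = -1 ∧ ∀ i, b ≤ i → ¬ pvOcc cs sep i) ∨
        (0 ≤ j ∧ b ≤ j.toNat ∧ pvOcc cs sep j.toNat ∧
          ∀ i, b ≤ i → i < j.toNat → ¬ pvOcc cs sep i) →
      b ≤ cs.length → cs.length + 1 - b ≤ fuel → chars.length = cs.length →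
      ∀ k, (pvMarkLoop cs sep fuel j chars)[k]? =
        if b + 2 ≤ k ∧ k < cs.length ∧ pvOcc cs sep (k - 2)
        then chars[k]?.map PySem.Chars.upperChar else chars[k]? := by
  intro fuel
  induction fuel with
  | zero => intro b j chars _ hb hf; omega
  | succ m ih =>
    intro b j chars hinv hb hf hlen k
    show (if j = -1 then chars else _)[k]? = _
    rcases hinv with ⟨hj, hnone⟩ | ⟨hj0, hbj, hocc, hmin⟩
    · rw [if_pos hj]
      rw [if_neg]
      rintro ⟨h1, h2, h3⟩
      exact hnone (k - 2) (by omega) h3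
    · have hjne : j ≠ -1 := by omega
      rw [if_neg hjne]
      set i := j.toNat with hi
      have hjcast : j = (i : Int) := by omega
      -- the occurrence is inside cs
      have hilt : i < cs.length := by
        by_contra h
        have : cs.drop i = [] := List.drop_eq_nil_of_le (by omega)
        rw [pvOcc, this, List.prefix_nil] at hocc
        exact hsep hocc
      have htn : (j + 2).toNat = i + 2 := by omega
      rw [htn]
      -- new state invariant at bound i+1 with j' = findFrom cs sep (i+1)
      have hk1 : i + 1 ≤ cs.length := by omega
      have hcast : j + 1 = ((i + 1 : Nat) : Int) := by omega
      have hIH := ih (i + 1) (PySem.Chars.findFrom cs sep (j + 1)) (pvUpdAt chars (i + 2))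
      have hinv' : (PySem.Chars.findFrom cs sep (j + 1) = -1 ∧
            ∀ i', i + 1 ≤ i' → ¬ pvOcc cs sep i') ∨
          (0 ≤ PySem.Chars.findFrom cs sep (j + 1) ∧
            i + 1 ≤ (PySem.Chars.findFrom cs sep (j + 1)).toNat ∧
            pvOcc cs sep (PySem.Chars.findFrom cs sep (j + 1)).toNat ∧
            ∀ i', i + 1 ≤ i' → i' < (PySem.Chars.findFrom cs sep (j + 1)).toNat →
              ¬ pvOcc cs sep i') := by
        rw [hcast]
        by_cases hne : PySem.Chars.findFrom cs sep ((i + 1 : Nat) : Int) = -1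
        · left
          refine ⟨hne, fun i' hi' hocc' => ?_⟩
          rw [PySem.Chars.findFrom_natCast_eq_neg_one_iff cs sep (i+1) hk1] at hne
          exact hne (pvOcc_infix cs sep (i+1) i' hi' hocc')
        · right
          obtain ⟨h1, h2, h3⟩ := PySem.Chars.findFrom_natCast_spec cs sep (i+1) hk1 hne
          exact ⟨by omega, by omega, h2, h3⟩
      rw [hIH hinv' hk1 (by omega) (by rw [pvUpdAt_length]; exact hlen)]
      -- unfold the single update
      have hupd : ∀ k', (pvUpdAt chars (i + 2))[k']? =
          if i + 2 = k' ∧ k' < cs.length then chars[k']?.map PySem.Chars.upperChar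
          else chars[k']? := by
        intro k'
        unfold pvUpdAt
        by_cases hlt : i + 2 < chars.length
        · rw [if_pos hlt, List.getElem?_set]
          by_cases he : i + 2 = k'
          · subst he
            rw [if_pos rfl, if_pos hlt, if_pos ⟨rfl, by omega⟩]
            have : chars.getD (i+2) ' ' = chars[i+2] := List.getD_eq_getElem _ _ hlt
            rw [this, List.getElem?_eq_getElem hlt]
            rfl
          · rw [if_neg he, if_neg (by tauto)]
        · rw [if_neg hlt, if_neg (by omega)]
      rw [hupd k]
      -- case analysis on k
      by_cases hA : i + 3 ≤ k ∧ k < cs.length ∧ pvOcc cs sep (k - 2)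
      · rw [if_pos hA, if_neg (by omega), if_pos ⟨by omega, hA.2.1, hA.2.2⟩]
      · rw [if_neg hA]
        by_cases hB : b + 2 ≤ k ∧ k < cs.length ∧ pvOcc cs sep (k - 2)
        · -- then necessarily k = i + 2
          have hki : k = i + 2 := by
            rcases Nat.lt_trichotomy (k - 2) i with h | h | h
            · exact absurd (hmin (k - 2) (by omega) h) (not_not_intro hB.2.2)
            · omega
            · exact absurd ⟨by omega, hB.2.1, hB.2.2⟩ hA
          rw [if_pos ⟨hki.symm, hB.2.1⟩, if_pos hB]
        · rw [if_neg hB, if_neg]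
          rintro ⟨he, hlt⟩
          exact hB ⟨by omega, by omega, by rw [← he]; simpa using hocc⟩

-- the invariant holds at the loop's entry point j = find cs sep, bound 0
theorem pvFind_inv (cs sep : List Char) :
    (PySem.Chars.find cs sep = -1 ∧ ∀ i, 0 ≤ i → ¬ pvOcc cs sep i) ∨
      (0 ≤ PySem.Chars.find cs sep ∧ 0 ≤ (PySem.Chars.find cs sep).toNat ∧
        pvOcc cs sep (PySem.Chars.find cs sep).toNat ∧
        ∀ i, 0 ≤ i → i < (PySem.Chars.find cs sep).toNat → ¬ pvOcc cs sep i) := by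
  by_cases h : PySem.Chars.find cs sep = -1
  · left
    refine ⟨h, fun i _ hocc => ?_⟩
    rw [PySem.Chars.find_eq_neg_one_iff] at h
    exact h (by simpa using pvOcc_infix cs sep 0 i (by omega) hocc)
  · right
    have h0 : 0 ≤ PySem.Chars.find cs sep := by
      have := PySem.Chars.neg_one_le_find cs sep; omega
    obtain ⟨h1, h2⟩ := PySem.Chars.find_spec h0
    exact ⟨h0, by omega, h1, fun i _ hi => h2 i hi⟩

-- one full pass for one separator, started as Source B starts it
theorem pvPass_getElem? (cs sep chars : List Char) (hsep : sep ≠ [])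
    (hlen : chars.length = cs.length) (k : Nat) :
    (pvMarkLoop cs sep (cs.length + 1) (PySem.Chars.find cs sep) chars)[k]? =
      if 2 ≤ k ∧ k < cs.length ∧ pvOcc cs sep (k - 2)
      then chars[k]?.map PySem.Chars.upperChar else chars[k]? := by
  have := pvMarkLoop_getElem? cs sep hsep (cs.length + 1) 0 (PySem.Chars.find cs sep) chars
    (by simpa using pvFind_inv cs sep) (by omega) (by omega) hlen k
  simpa using this

-- a two-character occurrence read off with getElem?
theorem pvOcc2_iff (cs : List Char) (a : Char) (m : Nat) :
    pvOcc cs [a, ' '] m ↔ cs[m]? = some a ∧ cs[m+1]? = some ' ' := by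
  unfold pvOcc
  constructor
  · rintro ⟨t, ht⟩
    have h0 : (cs.drop m)[0]? = some a := by rw [← ht]; rfl
    have h1 : (cs.drop m)[1]? = some ' ' := by rw [← ht]; rfl
    rw [List.getElem?_drop] at h0 h1
    exact ⟨by simpa using h0, by simpa using h1⟩
  · rintro ⟨h0, h1⟩
    have h0' : (cs.drop m)[0]? = some a := by rw [List.getElem?_drop]; simpa using h0
    have h1' : (cs.drop m)[1]? = some ' ' := by rw [List.getElem?_drop]; simpa using h1
    match hd : cs.drop m with
    | [] => rw [hd] at h0'; simp at h0'
    | [x] => rw [hd] at h1'; simp at h1'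
    | x :: y :: t =>
      rw [hd] at h0' h1'
      simp at h0' h1'
      exact ⟨t, by simp [h0', h1']⟩

-- B's capitalization condition after all three passes (at k < cs.length)
abbrev pvCapB (cs : List Char) (k : Nat) : Prop :=
  2 ≤ k ∧ k < cs.length ∧ cs[k-1]? = some ' ' ∧
    (cs[k-2]? = some '.' ∨ cs[k-2]? = some '?' ∨ cs[k-2]? = some '!')

-- the three passes compose to the union condition (the three patterns are mutually
-- exclusive at a position, so no character is uppercased twice)
theorem pvB3_getElem? (cs : List Char) (k : Nat) :
    ([['.', ' '], ['?', ' '], ['!', ' ']].foldl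
      (fun ch sep => pvMarkLoop cs sep (cs.length + 1) (PySem.Chars.find cs sep) ch) cs)[k]? =
      if pvCapB cs k then cs[k]?.map PySem.Chars.upperChar else cs[k]? := by
  have l1 : (pvMarkLoop cs ['.', ' '] (cs.length + 1) (PySem.Chars.find cs ['.', ' ']) cs).length
      = cs.length := pvMarkLoop_length _ _ _ _ _
  have l2 : (pvMarkLoop cs ['?', ' '] (cs.length + 1) (PySem.Chars.find cs ['?', ' '])
        (pvMarkLoop cs ['.', ' '] (cs.length + 1) (PySem.Chars.find cs ['.', ' ']) cs)).length
      = cs.length := by rw [pvMarkLoop_length]; exact l1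
  simp only [List.foldl_cons, List.foldl_nil]
  rw [pvPass_getElem? cs ['!', ' '] _ (by simp) l2 k,
      pvPass_getElem? cs ['?', ' '] _ (by simp) l1 k,
      pvPass_getElem? cs ['.', ' '] _ (by simp) rfl k]
  by_cases h2 : 2 ≤ k ∧ k < cs.length
  · have e1 : k - 2 + 1 = k - 1 := by omega
    simp only [pvOcc2_iff, e1]
    obtain ⟨h2a, h2b⟩ := h2
    by_cases hsp : cs[k-1]? = some ' '
    · by_cases hd : cs[k-2]? = some '.'
      · simp [pvCapB, hsp, hd, h2a, h2b]
      · by_cases hq : cs[k-2]? = some '?'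
        · simp [pvCapB, hsp, hq, h2a, h2b]
        · by_cases he : cs[k-2]? = some '!'
          · simp [pvCapB, hsp, he, h2a, h2b]
          · simp [pvCapB, hsp, hd, hq, he, h2a, h2b]
    · simp [pvCapB, hsp, h2a, h2b]
  · have c1 : ¬ (2 ≤ k ∧ k < cs.length ∧ pvOcc cs ['.', ' '] (k - 2)) := by tauto
    have c2 : ¬ (2 ≤ k ∧ k < cs.length ∧ pvOcc cs ['?', ' '] (k - 2)) := by tauto
    have c3 : ¬ (2 ≤ k ∧ k < cs.length ∧ pvOcc cs ['!', ' '] (k - 2)) := by tauto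
    have cb : ¬ pvCapB cs k := by unfold pvCapB; tauto
    rw [if_neg c3, if_neg c2, if_neg c1, if_neg cb]

-- B's condition agrees with A's at every in-range index ≥ 1
theorem pvCapB_iff_capOf (cs : List Char) (k : Nat) (hk : k < cs.length) (hk0 : k ≠ 0) :
    pvCapB cs k ↔ pvCapOf cs k = true := by
  unfold pvCapB pvCapOf
  by_cases h2 : 2 ≤ k
  · simp [hk0, h2, hk]
    by_cases hsp : cs[k-1]? = some ' '
    <;> by_cases hd : cs[k-2]? = some '.'
    <;> by_cases hq : cs[k-2]? = some '?'
    <;> by_cases he : cs[k-2]? = some '!'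
    <;> simp_all
  · have h1 : k = 1 := by omega
    subst h1
    simp

-- the common tail: append '.' unless the last character is a terminator
def pvTail (s : List Char) : String :=
  match PySem.List.pyGet? s (-1) with
  | none => String.ofList s
  | some c => if c ∈ (['.', '?', '!'] : List Char) then String.ofList s
              else String.ofList (s ++ ['.'])

-- B's marked-and-fixed character list equals A's emitted list
theorem pvB_core (cs : List Char) (c : Char) (rest : List Char)
    (hB : [['.', ' '], ['?', ' '], ['!', ' ']].foldl
      (fun ch sep => pvMarkLoop cs sep (cs.length + 1) (PySem.Chars.find cs sep) ch) cs
      = c :: rest) :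
    PySem.Chars.upperChar c :: rest = (List.range cs.length).map (pvEmitA cs) := by
  have hlenB : (c :: rest).length = cs.length := by
    rw [← hB]
    simp only [List.foldl_cons, List.foldl_nil]
    rw [pvMarkLoop_length, pvMarkLoop_length, pvMarkLoop_length]
  have hpos : 0 < cs.length := by simp at hlenB; omega
  apply List.ext_getElem?
  intro k
  have hBk := pvB3_getElem? cs k
  rw [hB] at hBk
  by_cases hk : k < cs.length
  · have hr : ((List.range cs.length).map (pvEmitA cs))[k]? = some (pvEmitA cs k) := by
      simp [hk]
    rw [hr, pvEmitA_eq cs k hk]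
    have hcs : cs[k]? = some cs[k] := List.getElem?_eq_getElem hk
    match k with
    | 0 =>
      have hcap0 : ¬ pvCapB cs 0 := by unfold pvCapB; omega
      rw [if_neg hcap0, hcs] at hBk
      have : c = cs[0] := by simpa using hBk
      simp [this, pvCapOf]
    | (n+1) =>
      have hget : (PySem.Chars.upperChar c :: rest)[n+1]? = (c :: rest)[n+1]? := by simp
      rw [hget, hBk]
      by_cases hcap : pvCapB cs (n+1)
      · have ht : pvCapOf cs (n+1) = true :=
          (pvCapB_iff_capOf cs (n+1) hk (by omega)).mp hcap
        rw [if_pos hcap, ht, if_pos rfl, hcs]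
        rfl
      · have ht : pvCapOf cs (n+1) = false := by
          cases hx : pvCapOf cs (n+1) with
          | false => rfl
          | true => exact absurd ((pvCapB_iff_capOf cs (n+1) hk (by omega)).mpr hx) hcap
        rw [if_neg hcap, ht, if_neg (by simp), hcs]
  · have h1 : ((List.range cs.length).map (pvEmitA cs))[k]? = none := by
      rw [List.getElem?_eq_none_iff]; simpa using hk
    have h2 : (PySem.Chars.upperChar c :: rest)[k]? = none := by
      rw [List.getElem?_eq_none_iff]
      have : (PySem.Chars.upperChar c :: rest).length = cs.length := by simpa using hlenB
      omega
    rw [h1, h2]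

-- A's whole function equals pvTail of the emitted list
theorem pvA_eq_tail (result : String) :
    usual_syntax result = pvTail ((List.range result.toList.length).map (pvEmitA result.toList)) := by
  show (let cs := result.toList
    let formatted := (PySem.List.pyRange 0 (PySem.Str.len result) 1).foldl
      (fun acc i =>
        if i == 0 then acc ++ [PySem.Chars.upperChar (PySem.List.pyGetD cs i ' ')]
        else if i > 1 then
          (if pvCondA cs i then acc ++ [PySem.Chars.upperChar (PySem.List.pyGetD cs i ' ')]
           else acc ++ [PySem.List.pyGetD cs i ' '])
        else acc ++ [PySem.List.pyGetD cs i ' ']) []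
    match PySem.List.pyGet? formatted (-1) with
    | none => String.ofList formatted
    | some c => if c ∈ (['.', '?', '!'] : List Char) then String.ofList formatted
                else String.ofList (formatted ++ ['.'])) = _
  simp only []
  rw [show PySem.Str.len result = (result.toList.length : Int) from by simp [pysem],
    loopA_eq result.toList]
  rfl

theorem core_eq (result : String) (hne : result ≠ "") :
    usual_syntax result = usual_syntax_alt result := by
  have hcs : result.toList ≠ [] := fun h => hne (String.toList_eq_nil_iff.mp h)
  rw [pvA_eq_tail]
  show _ = (let cs := result.toList
    let chars := [['.', ' '], ['?', ' '], ['!', ' ']].foldl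
      (fun ch sep => pvMarkLoop cs sep (cs.length + 1) (PySem.Chars.find cs sep) ch) cs
    match chars with
    | [] => ""
    | c :: rest =>
        let chars2 := PySem.Chars.upperChar c :: rest
        match PySem.List.pyGet? chars2 (-1) with
        | none => String.ofList chars2
        | some l => if l ∈ (['.', '?', '!'] : List Char) then String.ofList chars2
                    else String.ofList (chars2 ++ ['.']))
  simp only []
  match hB : [['.', ' '], ['?', ' '], ['!', ' ']].foldl
      (fun ch sep => pvMarkLoop result.toList sep (result.toList.length + 1)
        (PySem.Chars.find result.toList sep) ch) result.toList with
  | [] =>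
    exfalso
    have hlen : ([] : List Char).length = result.toList.length := by
      rw [← hB]
      simp only [List.foldl_cons, List.foldl_nil]
      rw [pvMarkLoop_length, pvMarkLoop_length, pvMarkLoop_length]
    simp at hlen
    exact hcs (List.length_eq_zero_iff.mp hlen.symm)
  | c :: rest =>
    show pvTail _ = pvTail (PySem.Chars.upperChar c :: rest)
    rw [pvB_core result.toList c rest hB]

-- ===== VERDICT (by name: the statement is the Claim_ definition above) =====
theorem usual_syntax_spec : Claim_equal_usual_syntax := by
  intro result _ hpre
  unfold Spec_usual_syntax
  exact core_eq result hpre
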